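-- pv_equiv track=rewrite | github.com/linden713/firefly-roleplay | script/construct_continue_pretrain_data.py | merge_consecutive_by_speaker
-- ===== SOURCE A (Python) =====
-- def merge_consecutive_by_speaker(turns):
--     if not turns: return []
--     merged = []
--     cur_s, cur_t = turns[0]["S"], [turns[0]["T"]]
--     for d in turns[1:]:
--         if d["S"] == cur_s:
--             cur_t.append(d["T"])
--         else:
--             merged.append({"S": cur_s, "T": "\n".join(cur_t)})
--             cur_s, cur_t = d["S"], [d["T"]]
--     merged.append({"S": cur_s, "T": "\n".join(cur_t)})
--     return merged
-- ===== SOURCE B (Python) =====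
-- def merge_consecutive_by_speaker(turns):
--     out = []
--     i, n = 0, len(turns)
--     while i < n:
--         s = turns[i]["S"]
--         j = i
--         parts = []
--         while j < n and turns[j]["S"] == s:
--             parts.append(turns[j]["T"])
--             j += 1
--         out.append({"S": s, "T": "\n".join(parts)})
--         i = j
--     return out
-- ===== Notes on version B (the rewrite author's own statement) =====
-- stated objective: alternative
-- what changed: Replaces A's flush-on-change accumulator (cur_s/cur_t state carried across the loop, with a duplicated final flush) by a two-pointer scan that consumes each maximal same-speaker run in one inner pass and emits its merged turn immediately.
import Mathlib
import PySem

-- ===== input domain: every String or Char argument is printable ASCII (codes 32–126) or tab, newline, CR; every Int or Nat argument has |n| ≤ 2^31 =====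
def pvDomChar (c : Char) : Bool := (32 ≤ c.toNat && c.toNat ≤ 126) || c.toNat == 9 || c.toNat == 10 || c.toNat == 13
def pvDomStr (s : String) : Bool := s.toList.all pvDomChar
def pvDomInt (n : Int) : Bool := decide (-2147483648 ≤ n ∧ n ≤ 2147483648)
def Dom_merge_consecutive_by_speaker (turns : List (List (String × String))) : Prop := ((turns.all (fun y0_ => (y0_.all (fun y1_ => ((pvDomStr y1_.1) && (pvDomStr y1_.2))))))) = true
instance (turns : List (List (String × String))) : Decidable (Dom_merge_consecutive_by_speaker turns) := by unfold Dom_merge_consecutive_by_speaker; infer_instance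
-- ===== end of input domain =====

-- B replaces A's flush-on-change accumulator by a two-pointer scan that emits each
-- maximal same-speaker run directly (alternative decomposition, same cost).


-- ===== PORT A =====
-- d[k] on an association list: first match; the "" default is never reached inside Pre_
-- (a missing key is a Python KeyError, excluded by Pre_).
def mcsGetK (d : List (String × String)) (k : String) : String := (d.lookup k).getD ""

-- the for-loop of A: state = (merged, cur_s, cur_t)
def mcsLoopA (rest : List (List (String × String))) (merged : List (List (String × String)))
    (curS : String) (curT : List String) : List (List (String × String)) :=
  match rest with
  | [] => merged ++ [[("S", curS), ("T", PySem.Str.join "\n" curT)]]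
  | d :: r =>
    if mcsGetK d "S" == curS then
      mcsLoopA r merged curS (curT ++ [mcsGetK d "T"])
    else
      mcsLoopA r (merged ++ [[("S", curS), ("T", PySem.Str.join "\n" curT)]])
        (mcsGetK d "S") [mcsGetK d "T"]

def merge_consecutive_by_speaker (turns : List (List (String × String))) : List (List (String × String)) :=
  match turns with
  | [] => []
  | d :: rest => mcsLoopA rest [] (mcsGetK d "S") [mcsGetK d "T"]

-- ===== PORT B =====
-- two-pointer scan: the inner while-loop collecting turns[i..j) of the same speaker is the
-- takeWhile/dropWhile split; each iteration of the outer loop emits one merged turn.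
def mcsGo (ts : List (List (String × String))) : List (List (String × String)) :=
  match ts with
  | [] => []
  | d :: rest =>
    let s := mcsGetK d "S"
    let grp := rest.takeWhile (fun e => mcsGetK e "S" == s)
    let rest' := rest.dropWhile (fun e => mcsGetK e "S" == s)
    [("S", s), ("T", PySem.Str.join "\n" (mcsGetK d "T" :: grp.map (mcsGetK · "T")))] :: mcsGo rest'
termination_by ts.length
decreasing_by
  simp only [List.length_cons]
  exact Nat.lt_succ_of_le (List.length_dropWhile_le _ _)

def merge_consecutive_by_speaker_alt (turns : List (List (String × String))) : List (List (String × String)) :=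
  mcsGo turns

-- ===== PRECONDITION & SPEC =====
-- Pre_ excludes exactly the inputs where A raises KeyError: a turn missing key "S" or "T".
def Pre_merge_consecutive_by_speaker (turns : List (List (String × String))) : Prop :=
  (turns.all (fun d => (d.lookup "S").isSome && (d.lookup "T").isSome)) = true
instance (turns : List (List (String × String))) : Decidable (Pre_merge_consecutive_by_speaker turns) := by unfold Pre_merge_consecutive_by_speaker; infer_instance
def pvWitness_merge_consecutive_by_speaker : (List (List (String × String))) :=
  [[("S", "a"), ("T", "hi")], [("S", "a"), ("T", "ho")], [("S", "b"), ("T", "x")]]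

def Spec_merge_consecutive_by_speaker (turns : List (List (String × String))) (out : List (List (String × String))) : Prop := out = merge_consecutive_by_speaker_alt turns
instance (turns : List (List (String × String))) (out : List (List (String × String))) : Decidable (Spec_merge_consecutive_by_speaker turns out) := by unfold Spec_merge_consecutive_by_speaker; infer_instance

-- ===== CLAIM (what is proved, stated in full; the proofs are below) =====
def Claim_equal_merge_consecutive_by_speaker : Prop := ∀ (turns : List (List (String × String))), Dom_merge_consecutive_by_speaker turns → Pre_merge_consecutive_by_speaker turns → Spec_merge_consecutive_by_speaker turns (merge_consecutive_by_speaker turns)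

-- ===== LEMMAS AND PROOFS =====
-- A's loop, started on state (merged, s, ts), appends the merged turn of the current run
-- (ts plus the "T"s of the longest prefix of rest with speaker s) and continues as B's scan.
theorem mcsLoopA_eq_go (r : List (List (String × String))) (merged : List (List (String × String)))
    (s : String) (ts : List String) :
    mcsLoopA r merged s ts =
      merged ++ [("S", s), ("T", PySem.Str.join "\n"
          (ts ++ (r.takeWhile (fun e => mcsGetK e "S" == s)).map (mcsGetK · "T")))] ::
        mcsGo (r.dropWhile (fun e => mcsGetK e "S" == s)) := by
  induction r generalizing merged s ts with
  | nil => simp [mcsLoopA, mcsGo]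
  | cons d r ih =>
    by_cases hb : (mcsGetK d "S" == s) = true
    · simp only [mcsLoopA, List.takeWhile_cons, List.dropWhile_cons, hb]
      rw [ih]
      simp
    · simp only [mcsLoopA, List.takeWhile_cons, List.dropWhile_cons, eq_false_of_ne_true hb,
        Bool.false_eq_true, if_false]
      rw [ih, List.append_assoc]
      conv_rhs => rw [mcsGo.eq_def]
      simp

-- ===== VERDICT (by name: the statement is the Claim_ definition above) =====
theorem merge_consecutive_by_speaker_spec : Claim_equal_merge_consecutive_by_speaker := by
  intro turns _ _
  unfold Spec_merge_consecutive_by_speaker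
  cases turns with
  | nil => simp [merge_consecutive_by_speaker, merge_consecutive_by_speaker_alt, mcsGo]
  | cons d rest =>
    show mcsLoopA rest [] (mcsGetK d "S") [mcsGetK d "T"] = merge_consecutive_by_speaker_alt (d :: rest)
    rw [mcsLoopA_eq_go]
    simp [merge_consecutive_by_speaker_alt, mcsGo]
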